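-- pv_equiv track=rewrite | github.com/ShabbeirShaik/zoho_ballProblem | ball.py | minit
-- ===== SOURCE A (Python) =====
-- def minit(n):
--     ml = []
--     for i in range(n):
--         l=[]
--         if(i==0):                         #function to initialize the matrix
--             for i in range(n):
--                 l.append("W")
--             ml.append(l)
--         elif(i<n-1):
--             for j in range(n):
--                 if(j==0 or j==n-1 ):
--                     l.append("W")
--                 else:
--                     l.append(" ")
--             ml.append(l)
--         else:
--             for j in range(n):
--                 if(j==0 or j==n-1 ):
--                     l.append("W")
--                 else:
--                     l.append("G")
--             ml.append(l)
--     return ml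
-- ===== SOURCE B (Python) =====
-- def minit(n):
--     # closed-form: build the three distinct row strings once via string repetition,
--     # assemble rows by list repetition, then split each string into a char list
--     if n <= 0:
--         return []
--     if n == 1:
--         return [["W"]]
--     rows = ["W" * n] + ["W" + " " * (n - 2) + "W"] * (n - 2) + ["W" + "G" * (n - 2) + "W"]
--     return [list(r) for r in rows]
-- ===== Notes on version B (the rewrite author's own statement) =====
-- stated objective: alternative
-- what changed: B has no per-cell loops or branches: it builds the three distinct row strings once with string repetition, assembles the grid as [top] + [mid]*(n-2) + [bot] by list repetition, and splits each row string into a character list, instead of A's nested loops deciding every cell with conditionals.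
import Mathlib
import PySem

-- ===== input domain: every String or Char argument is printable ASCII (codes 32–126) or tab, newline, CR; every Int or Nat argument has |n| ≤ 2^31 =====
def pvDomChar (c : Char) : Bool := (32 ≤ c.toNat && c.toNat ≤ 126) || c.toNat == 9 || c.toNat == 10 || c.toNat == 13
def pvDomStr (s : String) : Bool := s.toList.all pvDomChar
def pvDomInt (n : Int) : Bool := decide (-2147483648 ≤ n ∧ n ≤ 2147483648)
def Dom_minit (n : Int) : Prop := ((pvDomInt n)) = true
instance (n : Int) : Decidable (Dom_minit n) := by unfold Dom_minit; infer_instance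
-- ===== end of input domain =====

-- B replaces A's nested per-cell conditional loops by a closed-form assembly: the three
-- distinct row strings are built once by repetition and the grid is list-repeated; alternative, same cost.

-- ===== PORT A =====
def minit (n : Int) : List (List String) :=
  (PySem.List.pyRange 0 n 1).foldl (fun ml i =>
    if i == 0 then
      ml ++ [(PySem.List.pyRange 0 n 1).foldl (fun l _ => l ++ ["W"]) []]
    else if i < n - 1 then
      ml ++ [(PySem.List.pyRange 0 n 1).foldl (fun l j =>
          l ++ [if j == 0 || j == n - 1 then "W" else " "]) []]
    else
      ml ++ [(PySem.List.pyRange 0 n 1).foldl (fun l j =>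
          l ++ [if j == 0 || j == n - 1 then "W" else "G"]) []]) []

-- ===== PORT B =====
-- row strings are char lists ("W"*k = PySem.List.pyRepeat ['W'] k, + = ++);
-- list(r) maps each character to its one-character string.
def minit_alt (n : Int) : List (List String) :=
  if n ≤ 0 then []
  else if n == 1 then [["W"]]
  else
    let top := PySem.List.pyRepeat ['W'] n
    let mid := ['W'] ++ PySem.List.pyRepeat [' '] (n - 2) ++ ['W']
    let bot := ['W'] ++ PySem.List.pyRepeat ['G'] (n - 2) ++ ['W']
    let rows := [top] ++ PySem.List.pyRepeat [mid] (n - 2) ++ [bot]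
    rows.map (fun r => r.map (fun c => String.ofList [c]))

-- ===== PRECONDITION & SPEC =====
def Spec_minit (n : Int) (out : List (List String)) : Prop := out = minit_alt n
instance (n : Int) (out : List (List String)) : Decidable (Spec_minit n out) := by unfold Spec_minit; infer_instance

-- ===== CLAIM (what is proved, stated in full; the proofs are below) =====
def Claim_equal_minit : Prop := ∀ (n : Int), Dom_minit n → Spec_minit n (minit n)

-- ===== LEMMAS AND PROOFS =====

def rowC (m : Nat) (c : String) : List String := "W" :: List.replicate (m - 2) c ++ ["W"]

def canon (m : Nat) : List (List String) :=
  if m = 0 then []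
  else if m = 1 then [["W"]]
  else List.replicate m "W" :: List.replicate (m - 2) (rowC m " ") ++ [rowC m "G"]

theorem map_border (m : Nat) (c : String) (hm : 2 ≤ m) :
    (List.range m).map (fun (k : Nat) => if ((k:Int) == 0 || (k:Int) == (m:Int) - 1) then "W" else c)
      = rowC m c := by
  apply List.ext_getElem
  · simp [rowC]; omega
  · intro i h1 h2
    simp only [List.getElem_map, List.getElem_range, rowC]
    rcases i with _ | i
    · rw [List.getElem_append_left (by simp)]
      simp
    · have hi : i + 1 < m := by simpa using h1
      by_cases hlt : i < m - 2
      · rw [List.getElem_append_left (by simp; omega), List.getElem_cons_succ,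
          List.getElem_replicate]
        rw [if_neg]; simp; omega
      · have : i = m - 2 := by omega
        subst this
        rw [List.getElem_append_right (by simp)]
        simp
        omega

theorem map_rows (m : Nat) (a b c : List String) (hm : 2 ≤ m) :
    (List.range m).map (fun (k : Nat) =>
        if (k:Int) == 0 then a else if (k:Int) < (m:Int) - 1 then b else c)
      = a :: List.replicate (m - 2) b ++ [c] := by
  apply List.ext_getElem
  · simp; omega
  · intro i h1 h2
    simp only [List.getElem_map, List.getElem_range]
    rcases i with _ | i
    · rw [List.getElem_append_left (by simp)]
      simp
    · have hi : i + 1 < m := by simpa using h1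
      by_cases hlt : i < m - 2
      · rw [List.getElem_append_left (by simp; omega), List.getElem_cons_succ,
          List.getElem_replicate]
        rw [if_neg (by simp; omega), if_pos (by simp; omega)]
      · have : i = m - 2 := by omega
        subst this
        rw [List.getElem_append_right (by simp)]
        rw [if_neg (by simp; omega), if_neg (by simp; omega)]
        simp

theorem A_eq (n : Int) : minit n = canon n.toNat := by
  have hstep : (fun (ml : List (List String)) (i : Int) =>
      if i == 0 then
        ml ++ [(PySem.List.pyRange 0 n 1).foldl (fun l _ => l ++ ["W"]) []]
      else if i < n - 1 then
        ml ++ [(PySem.List.pyRange 0 n 1).foldl (fun l j =>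
            l ++ [if j == 0 || j == n - 1 then "W" else " "]) []]
      else
        ml ++ [(PySem.List.pyRange 0 n 1).foldl (fun l j =>
            l ++ [if j == 0 || j == n - 1 then "W" else "G"]) []])
      = (fun ml i => ml ++ [if i == 0 then
            (PySem.List.pyRange 0 n 1).foldl (fun l _ => l ++ ["W"]) []
          else if i < n - 1 then
            (PySem.List.pyRange 0 n 1).foldl (fun l j =>
              l ++ [if j == 0 || j == n - 1 then "W" else " "]) []
          else
            (PySem.List.pyRange 0 n 1).foldl (fun l j =>
              l ++ [if j == 0 || j == n - 1 then "W" else "G"]) []]) := by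
    funext ml i
    split_ifs <;> rfl
  unfold minit
  rw [hstep, PySem.List.foldl_append_singleton_eq_map, List.nil_append]
  simp only [PySem.List.foldl_append_singleton_eq_map, List.nil_append]
  rw [PySem.List.pyRange_one 0 n]
  simp only [Int.sub_zero, List.map_map, Function.comp_def, zero_add, List.map_const',
    List.length_range]
  by_cases h0 : n.toNat = 0
  · rw [h0]; simp [canon]
  · by_cases h1 : n.toNat = 1
    · rw [h1]
      have : n = 1 := by omega
      subst this
      simp [canon, List.range_succ]
    · have hm : 2 ≤ n.toNat := by omega
      have hn : n = (n.toNat : Int) := by omega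
      have hmap : ∀ (k : Nat),
          (if ((k:Int)) == 0 then List.replicate n.toNat "W"
           else if ((k:Int)) < n - 1 then
             (List.range n.toNat).map (fun (k2 : Nat) => if ((k2:Int)) == 0 || ((k2:Int)) == n - 1 then "W" else " ")
           else
             (List.range n.toNat).map (fun (k2 : Nat) => if ((k2:Int)) == 0 || ((k2:Int)) == n - 1 then "W" else "G"))
          = (if ((k:Int)) == 0 then List.replicate n.toNat "W"
             else if ((k:Int)) < ((n.toNat:Int)) - 1 then rowC n.toNat " " else rowC n.toNat "G") := by
        intro k
        rw [← map_border n.toNat " " hm, ← map_border n.toNat "G" hm, ← hn]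
      simp only [hmap]
      rw [map_rows n.toNat _ _ _ hm]
      simp [canon, h0, h1]

theorem B_eq (n : Int) : minit_alt n = canon n.toNat := by
  unfold minit_alt
  by_cases h0 : n ≤ 0
  · have : n.toNat = 0 := by omega
    simp [h0, this, canon]
  · by_cases h1 : n = 1
    · subst h1; simp [canon]
    · have hm : 2 ≤ n.toNat := by omega
      rw [if_neg h0, if_neg (by simpa using h1)]
      simp only [PySem.List.pyRepeat_singleton, List.map_append, List.map_cons, List.map_nil,
        List.map_replicate]
      have h2 : (n - 2).toNat = n.toNat - 2 := by omega
      rw [h2]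
      have hW : String.ofList ['W'] = "W" := rfl
      have hS : String.ofList [' '] = " " := rfl
      have hG : String.ofList ['G'] = "G" := rfl
      rw [hW, hS, hG]
      simp only [canon, rowC]
      rw [if_neg (by omega : ¬ n.toNat = 0), if_neg (by omega : ¬ n.toNat = 1)]
      simp

-- ===== VERDICT (by name: the statement is the Claim_ definition above) =====
theorem minit_spec : Claim_equal_minit := by
  intro n _
  unfold Spec_minit
  rw [A_eq, B_eq]
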